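-- pv_equiv track=rewrite | github.com/Introduction-to-Programming-OSOWSKI/3-13-unweave-claytonfollett2021 | main.py | unweave
-- ===== SOURCE A (Python) =====
-- def unweave(w):
--     newWord1 = ""
--     newWord2 = ""
--     for i in range(0, len(w), 2):
--         newWord1 = newWord1 + w[i]
--
--     for i in range (1, len(w), 2):
--         newWord2 = newWord2 + w[i]
--
--     return newWord1 + " " + newWord2
-- ===== SOURCE B (Python) =====
-- def unweave(w):
--     group1 = []
--     group2 = []
--     for i, c in enumerate(w):
--         if i % 2 == 0:
--             group1.append(c)
--         else:
--             group2.append(c)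
--     return ''.join(group1) + ' ' + ''.join(group2)
-- ===== Notes on version B (the rewrite author's own statement) =====
-- stated objective: alternative
-- what changed: Replaced A's two separate range(start,len,2) scans with repeated string concatenation by a single enumerate pass that distributes characters into two lists by index parity and joins them once.
import Mathlib
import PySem

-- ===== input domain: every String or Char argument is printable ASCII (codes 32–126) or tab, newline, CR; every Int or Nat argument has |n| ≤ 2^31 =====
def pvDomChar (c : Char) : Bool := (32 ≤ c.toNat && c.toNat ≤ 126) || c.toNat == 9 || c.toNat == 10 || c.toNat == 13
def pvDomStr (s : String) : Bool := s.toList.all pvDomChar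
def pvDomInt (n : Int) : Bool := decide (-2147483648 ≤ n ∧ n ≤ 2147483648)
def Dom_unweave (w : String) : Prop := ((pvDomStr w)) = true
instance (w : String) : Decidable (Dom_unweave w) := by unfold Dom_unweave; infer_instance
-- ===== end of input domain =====

-- B distributes the characters in one enumerate pass by index parity instead of A's two
-- sequential step-2 scans with repeated string concatenation.

-- ===== PORT A =====
def unweave (w : String) : String :=
  let cs := w.toList
  let n : Int := (cs.length : Int)
  let newWord1 : List Char :=
    (PySem.List.pyRange 0 n 2).foldl (fun acc i => acc ++ [PySem.List.pyGetD cs i ' ']) []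
  let newWord2 : List Char :=
    (PySem.List.pyRange 1 n 2).foldl (fun acc i => acc ++ [PySem.List.pyGetD cs i ' ']) []
  String.ofList (newWord1 ++ [' '] ++ newWord2)

-- ===== PORT B =====
def unweave_alt (w : String) : String :=
  let p : List Char × List Char :=
    (PySem.List.enumerate w.toList 0).foldl
      (fun (acc : List Char × List Char) ic =>
        if PySem.Int.mod ic.1 2 = 0 then (acc.1 ++ [ic.2], acc.2)
        else (acc.1, acc.2 ++ [ic.2])) ([], [])
  String.ofList (p.1 ++ [' '] ++ p.2)

-- ===== PRECONDITION & SPEC =====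
def Spec_unweave (w : String) (out : String) : Prop := out = unweave_alt w
instance (w : String) (out : String) : Decidable (Spec_unweave w out) := by unfold Spec_unweave; infer_instance

-- ===== CLAIM (what is proved, stated in full; the proofs are below) =====
def Claim_equal_unweave : Prop := ∀ (w : String), Dom_unweave w → Spec_unweave w (unweave w)

-- ===== LEMMAS AND PROOFS =====

-- (evens, odds): the characters at even and at odd indices, in order.
def pvDeal {α : Type} : List α → List α × List α
  | [] => ([], [])
  | x :: t => ((x :: (pvDeal t).2 : List α), (pvDeal t).1)

theorem pvRange_two_nil (a b : Int) (h : b ≤ a) : PySem.List.pyRange a b 2 = [] := by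
  rw [PySem.List.pyRange_of_pos a b (by norm_num)]
  simp [show ¬ a < b by omega]

theorem pvRange_two_cons (a b : Int) (h : a < b) :
    PySem.List.pyRange a b 2 = a :: PySem.List.pyRange (a + 2) b 2 := by
  rw [PySem.List.pyRange_of_pos a b (by norm_num),
      PySem.List.pyRange_of_pos (a + 2) b (by norm_num)]
  have hc : ((b - a + 2 - 1) / 2).toNat
      = (if a + 2 < b then ((b - (a + 2) + 2 - 1) / 2).toNat else 0) + 1 := by
    split_ifs with h2 <;> omega
  rw [if_pos h, hc, List.range_succ_eq_map, List.map_cons, List.map_map]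
  congr 1
  · norm_num
  · apply List.map_congr_left
    intro k _
    simp [Function.comp]
    ring

theorem pvGetD_cons_succ {α : Type} (x : α) (xs : List α) (i : Int) (d : α) (hi : 0 ≤ i) :
    PySem.List.pyGetD (x :: xs) (i + 1) d = PySem.List.pyGetD xs i d := by
  obtain ⟨n, rfl⟩ := Int.eq_ofNat_of_zero_le hi
  have : ((n : Int) + 1) = ((n + 1 : Nat) : Int) := by push_cast; ring
  rw [this, PySem.List.pyGetD_natCast, PySem.List.pyGetD_natCast]
  simp

theorem pvGetD_cons_add_two {α : Type} (x y : α) (xs : List α) (i : Int) (d : α) (hi : 0 ≤ i) :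
    PySem.List.pyGetD (x :: y :: xs) (i + 2) d = PySem.List.pyGetD xs i d := by
  have h1 : i + 2 = (i + 1) + 1 := by ring
  rw [h1, pvGetD_cons_succ x _ (i + 1) d (by omega), pvGetD_cons_succ y _ i d hi]

theorem pvRange_two_shift (a b : Int) :
    PySem.List.pyRange (a + 2) b 2 = (PySem.List.pyRange a (b - 2) 2).map (· + 2) := by
  rw [PySem.List.pyRange_of_pos (a + 2) b (by norm_num),
      PySem.List.pyRange_of_pos a (b - 2) (by norm_num)]
  have hcount : (if a + 2 < b then ((b - (a + 2) + 2 - 1) / 2).toNat else 0)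
      = (if a < b - 2 then ((b - 2 - a + 2 - 1) / 2).toNat else 0) := by
    split_ifs <;> omega
  rw [List.map_map, hcount]
  apply List.map_congr_left
  intro k _
  simp [Function.comp]
  ring

-- A's two step-2 index scans compute exactly the even- and odd-index characters.
theorem pvDealA : ∀ (cs : List Char) (d : Char),
    (PySem.List.pyRange 0 (cs.length : Int) 2).map (fun i => PySem.List.pyGetD cs i d)
        = (pvDeal cs).1
    ∧ (PySem.List.pyRange 1 (cs.length : Int) 2).map (fun i => PySem.List.pyGetD cs i d)
        = (pvDeal cs).2
  | [], d => by
    simp [pvDeal, pvRange_two_nil 0 0 (by omega), pvRange_two_nil 1 0 (by omega)]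
  | [x], d => by
    constructor
    · rw [pvRange_two_cons 0 _ (by simp)]
      simp [pvRange_two_nil 2 1 (by omega), pvDeal, PySem.List.pyGetD_zero_cons]
    · simp [pvRange_two_nil 1 1 (by omega), pvDeal]
  | x :: y :: t, d => by
    have ih := pvDealA t d
    have hn : ((x :: y :: t).length : Int) = (t.length : Int) + 2 := by
      simp; ring
    have hmem : ∀ a : Int, 0 ≤ a →
        (PySem.List.pyRange a ((t.length : Int) + 2 - 2) 2).map
          ((fun i => PySem.List.pyGetD (x :: y :: t) i d) ∘ (· + 2))
        = (PySem.List.pyRange a (t.length : Int) 2).map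
            (fun i => PySem.List.pyGetD t i d) := by
      intro a ha
      have h2 : ((t.length : Int) + 2 - 2) = (t.length : Int) := by ring
      rw [h2]
      apply List.map_congr_left
      intro i hi
      have h0 : 0 ≤ i := by
        have := (PySem.List.mem_pyRange_iff_of_pos (by norm_num : (0:Int) < 2) i).1 hi
        omega
      simp only [Function.comp]
      exact pvGetD_cons_add_two x y t i d h0
    constructor
    · rw [hn, pvRange_two_cons 0 _ (by positivity), pvRange_two_shift 0 _,
          List.map_cons, List.map_map, hmem 0 le_rfl, ih.1]
      simp [pvDeal, PySem.List.pyGetD_zero_cons]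
    · rw [hn, pvRange_two_cons 1 _ (by omega), pvRange_two_shift 1 _,
          List.map_cons, List.map_map, hmem 1 (by omega), ih.2]
      have hy : PySem.List.pyGetD (x :: y :: t) 1 d = y := by
        rw [show (1:Int) = 0 + 1 by ring, pvGetD_cons_succ x _ 0 d le_rfl,
            PySem.List.pyGetD_zero_cons]
      simp [pvDeal, hy]

-- B's single enumerate pass distributes the characters of cs by the parity of the index.
theorem pvFoldB (cs : List Char) : ∀ (s : Int) (a1 a2 : List Char),
    (PySem.List.enumerate cs s).foldl
      (fun (acc : List Char × List Char) ic =>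
        if PySem.Int.mod ic.1 2 = 0 then (acc.1 ++ [ic.2], acc.2)
        else (acc.1, acc.2 ++ [ic.2])) (a1, a2)
    = if PySem.Int.mod s 2 = 0 then (a1 ++ (pvDeal cs).1, a2 ++ (pvDeal cs).2)
      else (a1 ++ (pvDeal cs).2, a2 ++ (pvDeal cs).1) := by
  induction cs with
  | nil => intro s a1 a2; simp [PySem.List.enumerate, pvDeal]
  | cons x t ih =>
    intro s a1 a2
    rw [PySem.List.enumerate_cons, List.foldl_cons]
    have hmod : ∀ z : Int, PySem.Int.mod z 2 = z % 2 :=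
      fun z => PySem.Int.mod_eq_emod_of_pos (by norm_num)
    by_cases hs : PySem.Int.mod s 2 = 0
    · have hs1 : ¬ PySem.Int.mod (s + 1) 2 = 0 := by rw [hmod] at hs ⊢; omega
      rw [if_pos hs, if_pos hs, ih (s + 1) (a1 ++ [x]) a2, if_neg hs1]
      simp [pvDeal]
    · have hs1 : PySem.Int.mod (s + 1) 2 = 0 := by rw [hmod] at hs ⊢; omega
      rw [if_neg hs, if_neg hs, ih (s + 1) a1 (a2 ++ [x]), if_pos hs1]
      simp [pvDeal]

-- ===== VERDICT (by name: the statement is the Claim_ definition above) =====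
theorem unweave_spec : Claim_equal_unweave := by
  intro w _
  unfold Spec_unweave unweave unweave_alt
  simp only
  rw [PySem.List.foldl_append_singleton_eq_map (fun i => PySem.List.pyGetD w.toList i ' '),
      PySem.List.foldl_append_singleton_eq_map (fun i => PySem.List.pyGetD w.toList i ' '),
      List.nil_append, List.nil_append,
      (pvDealA w.toList ' ').1, (pvDealA w.toList ' ').2,
      pvFoldB w.toList 0 [] [],
      if_pos (by decide : PySem.Int.mod 0 2 = 0)]
  simp
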